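-- pv_equiv track=rewrite | github.com/jeremycochoy/pitchnet | pitchnet/transformations.py | segmentation_to_notes_indices
-- ===== SOURCE A (Python) =====
-- def segmentation_to_notes_indices(segmentation):
--     """
--     Return a list of pairs of start & end of the notes described by a segmentation.
--
--     The output is of the form `[[start: int, end: int]]`.
--     """
--     notes = []
--     current_indicator = segmentation[0]
--     start = 0
--     for i in range(len(segmentation)):
--         # Still browsing the same note/silence
--         if segmentation[i] == current_indicator:
--             continue
--
--         if current_indicator == 0:
--             # We was browsing a silence
--             start = i
--             current_indicator = segmentation[i]
--         else:
--             # We are browsing a note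
--             end = i - 1
--             notes.append([start, end])
--             # Now start a new note/silence
--             start = i
--             current_indicator = segmentation[i]
--     return notes
-- ===== SOURCE B (Python) =====
-- def segmentation_to_notes_indices(segmentation):
--     """
--     Return a list of pairs of start & end of the notes described by a segmentation.
--
--     The output is of the form `[[start: int, end: int]]`.
--     """
--     n = len(segmentation)
--     # Note starts: nonzero positions opening a new run.
--     starts = [i for i in range(n)
--               if segmentation[i] != 0
--               and (i == 0 or segmentation[i] != segmentation[i - 1])]
--     # Note ends: last position of a nonzero run that is CLOSED by a following run.
--     ends = [i - 1 for i in range(1, n)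
--             if segmentation[i - 1] != 0
--             and segmentation[i] != segmentation[i - 1]]
--     # zip pairs each closed note's start with its end; an unclosed trailing
--     # note has no end and is dropped by zip's truncation.
--     return [[s, e] for s, e in zip(starts, ends)]
-- ===== Notes on version B (the rewrite author's own statement) =====
-- stated objective: alternative
-- what changed: Replaces A's single stateful boundary scan (current_indicator/start/notes bookkeeping with three-way branching) by two independent index comprehensions - the list of note-start indices and the list of note-end indices, each defined by a local boundary condition - paired positionally with zip, whose truncation drops the unclosed trailing note.
import Mathlib
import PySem

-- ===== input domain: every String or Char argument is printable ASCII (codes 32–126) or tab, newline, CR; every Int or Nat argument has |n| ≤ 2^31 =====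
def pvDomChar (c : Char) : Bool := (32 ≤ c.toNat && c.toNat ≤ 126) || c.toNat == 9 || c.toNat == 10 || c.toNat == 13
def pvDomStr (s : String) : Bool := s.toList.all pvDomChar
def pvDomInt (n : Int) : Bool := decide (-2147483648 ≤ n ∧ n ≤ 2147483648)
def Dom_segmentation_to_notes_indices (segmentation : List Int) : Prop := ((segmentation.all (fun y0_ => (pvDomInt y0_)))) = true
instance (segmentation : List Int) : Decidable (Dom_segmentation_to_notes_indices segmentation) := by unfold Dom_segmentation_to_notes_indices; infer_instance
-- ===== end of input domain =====

-- B replaces A's stateful boundary scan by two independent boundary-index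
-- comprehensions (note starts and note ends) paired by zip; same cost,
-- different decomposition ("alternative", not faster).

-- ===== PORT A =====
-- A's loop body: state (notes, current_indicator, start), index i.
def pvStepA (segmentation : List Int) (st : List (List Int) × Int × Int) (i : Int) :
    List (List Int) × Int × Int :=
  let x := PySem.List.pyGetD segmentation i 0
  if x = st.2.1 then st
  else if st.2.1 = 0 then (st.1, x, i)
  else (st.1 ++ [[st.2.2, i - 1]], x, i)

def segmentation_to_notes_indices (segmentation : List Int) : List (List Int) :=
  ((PySem.List.pyRange 0 (segmentation.length : Int) 1).foldl (pvStepA segmentation)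
    ([], PySem.List.pyGetD segmentation 0 0, 0)).1

-- ===== PORT B =====
-- B's start-of-note condition at index i.
def pvStartCond (segmentation : List Int) (i : Int) : Bool :=
  PySem.List.pyGetD segmentation i 0 != 0 &&
    (i == 0 || PySem.List.pyGetD segmentation i 0 != PySem.List.pyGetD segmentation (i - 1) 0)

-- B's end-of-note condition (a closed note ends at i - 1).
def pvEndCond (segmentation : List Int) (i : Int) : Bool :=
  PySem.List.pyGetD segmentation (i - 1) 0 != 0 &&
    PySem.List.pyGetD segmentation i 0 != PySem.List.pyGetD segmentation (i - 1) 0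

def segmentation_to_notes_indices_alt (segmentation : List Int) : List (List Int) :=
  let n : Int := (segmentation.length : Int)
  let starts := (PySem.List.pyRange 0 n 1).filter (pvStartCond segmentation)
  let ends := ((PySem.List.pyRange 1 n 1).filter (pvEndCond segmentation)).map (fun i => i - 1)
  (starts.zip ends).map (fun p => [p.1, p.2])

-- ===== PRECONDITION & SPEC =====
-- Pre_ excludes only the empty list, on which A's initial segmentation[0] raises IndexError.
def Pre_segmentation_to_notes_indices (segmentation : List Int) : Prop := segmentation ≠ []
instance (segmentation : List Int) : Decidable (Pre_segmentation_to_notes_indices segmentation) := by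
  unfold Pre_segmentation_to_notes_indices; infer_instance

def pvWitness_segmentation_to_notes_indices : List Int := [0, 1, 1, 0]

def Spec_segmentation_to_notes_indices (segmentation : List Int) (out : List (List Int)) : Prop := out = segmentation_to_notes_indices_alt segmentation
instance (segmentation : List Int) (out : List (List Int)) : Decidable (Spec_segmentation_to_notes_indices segmentation out) := by unfold Spec_segmentation_to_notes_indices; infer_instance

-- ===== CLAIM (what is proved, stated in full; the proofs are below) =====
def Claim_equal_segmentation_to_notes_indices : Prop := ∀ (segmentation : List Int), Dom_segmentation_to_notes_indices segmentation → Pre_segmentation_to_notes_indices segmentation → Spec_segmentation_to_notes_indices segmentation (segmentation_to_notes_indices segmentation)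

-- ===== LEMMAS AND PROOFS =====

-- Loop invariant: A's scan from index j, in state (notes, ci, ps) with
-- ci = segmentation[j-1], yields notes followed by the zip of the pending
-- start (if the current run is a note) plus the remaining start indices
-- against the remaining end indices.
theorem pv_loop (seg : List Int) (n : Int) (hn : n = (seg.length : Int)) :
    ∀ (k : Nat) (j : Int), 1 ≤ j → n ≤ j + k →
    ∀ (notes : List (List Int)) (ci ps : Int),
      ci = PySem.List.pyGetD seg (j - 1) 0 →
      ((PySem.List.pyRange j n 1).foldl (pvStepA seg) (notes, ci, ps)).1
        = notes ++
          ((((if ci ≠ 0 then [ps] else []) ++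
              (PySem.List.pyRange j n 1).filter (pvStartCond seg)).zip
            (((PySem.List.pyRange j n 1).filter (pvEndCond seg)).map (fun i => i - 1))).map
              (fun p => [p.1, p.2])) := by
  intro k
  induction k with
  | zero =>
    intro j hj hnk notes ci ps h1
    rw [PySem.List.pyRange_one_eq_nil (by omega)]
    simp
  | succ k ih =>
    intro j hj hnk notes ci ps h1
    by_cases hlt : j < n
    · rw [PySem.List.pyRange_one_cons hlt]
      simp only [List.foldl_cons, List.filter_cons]
      have hj0 : (j == (0:Int)) = false := by simp; omega
      by_cases hx : PySem.List.pyGetD seg j 0 = ci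
      · have hA : pvStepA seg (notes, ci, ps) j = (notes, ci, ps) := by
          simp [pvStepA, hx]
        have hs : pvStartCond seg j = false := by
          simp [pvStartCond, hj0, ← h1, hx]
        have he : pvEndCond seg j = false := by
          simp [pvEndCond, ← h1, hx]
        rw [hA, hs, he]
        simpa using ih (j + 1) (by omega) (by omega) notes ci ps (by simpa using hx.symm)
      · by_cases hc0 : ci = 0
        · subst hc0
          have hA : pvStepA seg (notes, 0, ps) j = (notes, PySem.List.pyGetD seg j 0, j) := by
            simp [pvStepA, hx]
          have hs : pvStartCond seg j = true := by
            simp [pvStartCond, hj0, ← h1, hx]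
          have he : pvEndCond seg j = false := by
            simp [pvEndCond, ← h1]
          rw [hA, hs, he]
          rw [ih (j + 1) (by omega) (by omega) notes (PySem.List.pyGetD seg j 0) j (by simp)]
          rw [if_pos hx]
          simp
        · have hbne : (PySem.List.pyGetD seg j 0 != ci) = true := by simpa using hx
          have hcib : (ci != (0 : Int)) = true := by simpa using hc0
          have hA : pvStepA seg (notes, ci, ps) j
              = (notes ++ [[ps, j - 1]], PySem.List.pyGetD seg j 0, j) := by
            simp [pvStepA, hx, hc0]
          have hs : pvStartCond seg j = (PySem.List.pyGetD seg j 0 != 0) := by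
            simp [pvStartCond, hj0, ← h1, hbne]
          have he : pvEndCond seg j = true := by
            simp [pvEndCond, ← h1, hbne, hcib]
          rw [hA, hs, he]
          rw [ih (j + 1) (by omega) (by omega) (notes ++ [[ps, j - 1]])
            (PySem.List.pyGetD seg j 0) j (by simp)]
          rw [if_pos hc0]
          by_cases hz : PySem.List.pyGetD seg j 0 = 0 <;> simp [hz]
    · rw [PySem.List.pyRange_one_eq_nil (by omega)]
      simp

-- ===== VERDICT (by name: the statement is the Claim_ definition above) =====
theorem segmentation_to_notes_indices_spec : Claim_equal_segmentation_to_notes_indices := by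
  intro seg _ hpre
  unfold Spec_segmentation_to_notes_indices
  unfold segmentation_to_notes_indices segmentation_to_notes_indices_alt
  have hlen : 1 ≤ (seg.length : Int) := by
    have : seg.length ≠ 0 := by simpa [List.length_eq_zero_iff] using hpre
    omega
  have hcons : PySem.List.pyRange 0 (seg.length : Int) 1
      = 0 :: PySem.List.pyRange 1 (seg.length : Int) 1 := by
    simpa using PySem.List.pyRange_one_cons (show (0:Int) < (seg.length : Int) by omega)
  have h0 : pvStepA seg ([], PySem.List.pyGetD seg 0 0, 0) 0
      = ([], PySem.List.pyGetD seg 0 0, 0) := by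
    simp [pvStepA]
  have hs0 : pvStartCond seg 0 = (PySem.List.pyGetD seg 0 0 != 0) := by
    simp [pvStartCond]
  simp only [hcons, List.foldl_cons, List.filter_cons, h0, hs0]
  rw [pv_loop seg (seg.length : Int) rfl seg.length 1 (by omega) (by omega)
    [] (PySem.List.pyGetD seg 0 0) 0 (by norm_num)]
  by_cases hz : PySem.List.pyGetD seg 0 0 = 0 <;> simp [hz]
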